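-- pv_equiv track=rewrite | github.com/zyukyunman/vortex_quant | vortex/research/goal_review.py | select_next_research_actions
-- ===== SOURCE A (Python) =====
-- def select_next_research_actions(failures: list[str] | tuple[str, ...]) -> list[str]:
--     """根据失败原因生成继续执行动作。"""
--
--     failure_set = set(failures)
--     actions: list[str] = []
--     if any(_is_invalid_failure(item) for item in failure_set):
--         actions.append("先修正实验可信度：复权、PIT、成本、未来函数和样本外检查。")
--     if "annual_return_below_target" in failure_set:
--         actions.append("停止重复旧参数网格，转向新 alpha：日频事件、行业轮动、盈利惊喜、资金流和价格延迟。")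
--     if "max_drawdown_above_limit" in failure_set:
--         actions.append("补市场状态和行业状态数据，评估风险预算、现金管理或对冲机制。")
--     if "out_of_sample_missing" in failure_set:
--         actions.append("运行 walk-forward，冻结参数并输出样本外稳定性。")
--     if not actions:
--         actions.append("归档达标策略，生成可复现报告和 lineage。")
--     return actions
--
-- def _is_invalid_failure(failure: str) -> bool:
--     return failure in {
--         "missing_quality_check",
--         "pit_not_safe",
--         "prices_not_adjusted",
--         "cost_not_included",
--         "future_leakage_risk",
--     }
-- ===== SOURCE B (Python) =====
-- _ACTIONS = [
--     "先修正实验可信度：复权、PIT、成本、未来函数和样本外检查。",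
--     "停止重复旧参数网格，转向新 alpha：日频事件、行业轮动、盈利惊喜、资金流和价格延迟。",
--     "补市场状态和行业状态数据，评估风险预算、现金管理或对冲机制。",
--     "运行 walk-forward，冻结参数并输出样本外稳定性。",
-- ]
--
-- _RULE_OF = {
--     "missing_quality_check": 0,
--     "pit_not_safe": 0,
--     "prices_not_adjusted": 0,
--     "cost_not_included": 0,
--     "future_leakage_risk": 0,
--     "annual_return_below_target": 1,
--     "max_drawdown_above_limit": 2,
--     "out_of_sample_missing": 3,
-- }
--
--
-- def select_next_research_actions(failures):
--     """根据失败原因生成继续执行动作。"""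
--     triggered = [False] * 4
--     for failure in failures:
--         i = _RULE_OF.get(failure)
--         if i is not None:
--             triggered[i] = True
--     actions = [_ACTIONS[i] for i in range(4) if triggered[i]]
--     return actions or ["归档达标策略，生成可复现报告和 lineage。"]
-- ===== Notes on version B (the rewrite author's own statement) =====
-- stated objective: alternative
-- what changed: Instead of building a set of all failures and testing it against each rule's trigger set, B makes one pass over the failures themselves, classifying each failure into a rule index via an inverse lookup table and setting a flag array, then emits the actions whose flag is set (archive default if none).
import Mathlib
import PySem

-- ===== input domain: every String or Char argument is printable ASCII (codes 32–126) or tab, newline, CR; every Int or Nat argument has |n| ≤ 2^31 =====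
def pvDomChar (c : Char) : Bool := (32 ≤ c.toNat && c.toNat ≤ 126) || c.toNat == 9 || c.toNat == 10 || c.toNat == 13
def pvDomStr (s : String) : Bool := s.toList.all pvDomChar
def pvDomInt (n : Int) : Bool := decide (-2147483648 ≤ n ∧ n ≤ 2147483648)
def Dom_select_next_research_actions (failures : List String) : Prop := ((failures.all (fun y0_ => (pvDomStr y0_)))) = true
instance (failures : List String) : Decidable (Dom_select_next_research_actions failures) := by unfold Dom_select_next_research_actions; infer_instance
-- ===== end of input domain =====

-- B replaces A's set-of-failures tested against each rule by one pass over the failures,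
-- classifying each failure via an inverse lookup table into a flag array (objective: alternative).

-- ===== PORT A =====
def pvIsInvalidFailure (failure : String) : Bool :=
  PySem.Set.contains (PySem.Set.ofList
    ["missing_quality_check", "pit_not_safe", "prices_not_adjusted",
     "cost_not_included", "future_leakage_risk"]) failure

def select_next_research_actions (failures : List String) : List String :=
  let failure_set := PySem.Set.ofList failures
  let actions : List String := []
  let actions := if failure_set.any (fun item => pvIsInvalidFailure item)
    then actions ++ ["先修正实验可信度：复权、PIT、成本、未来函数和样本外检查。"] else actions
  let actions := if PySem.Set.contains failure_set "annual_return_below_target"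
    then actions ++ ["停止重复旧参数网格，转向新 alpha：日频事件、行业轮动、盈利惊喜、资金流和价格延迟。"] else actions
  let actions := if PySem.Set.contains failure_set "max_drawdown_above_limit"
    then actions ++ ["补市场状态和行业状态数据，评估风险预算、现金管理或对冲机制。"] else actions
  let actions := if PySem.Set.contains failure_set "out_of_sample_missing"
    then actions ++ ["运行 walk-forward，冻结参数并输出样本外稳定性。"] else actions
  let actions := if actions = [] then actions ++ ["归档达标策略，生成可复现报告和 lineage。"] else actions
  actions

-- ===== PORT B =====
def pvActions : List String :=
  [ "先修正实验可信度：复权、PIT、成本、未来函数和样本外检查。",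
    "停止重复旧参数网格，转向新 alpha：日频事件、行业轮动、盈利惊喜、资金流和价格延迟。",
    "补市场状态和行业状态数据，评估风险预算、现金管理或对冲机制。",
    "运行 walk-forward，冻结参数并输出样本外稳定性。" ]

def pvRuleOf : PySem.Dict String Int :=
  PySem.Dict.mk
    [ ("missing_quality_check", 0), ("pit_not_safe", 0), ("prices_not_adjusted", 0),
      ("cost_not_included", 0), ("future_leakage_risk", 0),
      ("annual_return_below_target", 1), ("max_drawdown_above_limit", 2),
      ("out_of_sample_missing", 3) ]

def select_next_research_actions_alt (failures : List String) : List String :=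
  let triggered : List Bool := [false, false, false, false]
  let triggered := failures.foldl (fun t failure =>
      match PySem.Dict.get? pvRuleOf failure with
      | some i => PySem.List.pySetD t i true
      | none => t) triggered
  let actions := ((PySem.List.pyRange 0 4 1).filter
      (fun i => PySem.List.pyGetD triggered i false)).map
      (fun i => PySem.List.pyGetD pvActions i "")
  if actions = [] then ["归档达标策略，生成可复现报告和 lineage。"] else actions

-- ===== PRECONDITION & SPEC =====
def Spec_select_next_research_actions (failures : List String) (out : List String) : Prop := out = select_next_research_actions_alt failures
instance (failures : List String) (out : List String) : Decidable (Spec_select_next_research_actions failures out) := by unfold Spec_select_next_research_actions; infer_instance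

-- ===== CLAIM (what is proved, stated in full; the proofs are below) =====
def Claim_equal_select_next_research_actions : Prop := ∀ (failures : List String), Dom_select_next_research_actions failures → Spec_select_next_research_actions failures (select_next_research_actions failures)


-- ===== LEMMAS AND PROOFS =====

-- evaluating the inverse lookup table
theorem pv_ruleOf_range (f : String) (i : Int) (h : PySem.Dict.get? pvRuleOf f = some i) :
    0 ≤ i ∧ i ≤ 3 := by
  simp only [pvRuleOf, PySem.Dict.get?_mk_cons] at h
  split_ifs at h <;> simp [PySem.Dict.get?] at h <;> omega

theorem pv_ruleOf_none (f : String)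
    (h1 : f ≠ "missing_quality_check") (h2 : f ≠ "pit_not_safe")
    (h3 : f ≠ "prices_not_adjusted") (h4 : f ≠ "cost_not_included")
    (h5 : f ≠ "future_leakage_risk") (h6 : f ≠ "annual_return_below_target")
    (h7 : f ≠ "max_drawdown_above_limit") (h8 : f ≠ "out_of_sample_missing") :
    PySem.Dict.get? pvRuleOf f = none := by
  simp [pvRuleOf, PySem.Dict.get?,
    Ne.symm h1, Ne.symm h2, Ne.symm h3, Ne.symm h4, Ne.symm h5, Ne.symm h6, Ne.symm h7, Ne.symm h8]

-- bridges: per-element classification vs A's membership tests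
theorem pv_ruleOf_eq_zero (f : String) :
    (PySem.Dict.get? pvRuleOf f == some 0) = pvIsInvalidFailure f := by
  by_cases h1 : f = "missing_quality_check"; · subst h1; decide
  by_cases h2 : f = "pit_not_safe"; · subst h2; decide
  by_cases h3 : f = "prices_not_adjusted"; · subst h3; decide
  by_cases h4 : f = "cost_not_included"; · subst h4; decide
  by_cases h5 : f = "future_leakage_risk"; · subst h5; decide
  by_cases h6 : f = "annual_return_below_target"; · subst h6; decide
  by_cases h7 : f = "max_drawdown_above_limit"; · subst h7; decide
  by_cases h8 : f = "out_of_sample_missing"; · subst h8; decide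
  rw [pv_ruleOf_none f h1 h2 h3 h4 h5 h6 h7 h8, Bool.eq_iff_iff]
  simp [pvIsInvalidFailure, PySem.Set.mem_ofList, h1, h2, h3, h4, h5]

theorem pv_ruleOf_eq_one (f : String) :
    (PySem.Dict.get? pvRuleOf f == some 1) = (f == "annual_return_below_target") := by
  by_cases h1 : f = "missing_quality_check"; · subst h1; decide
  by_cases h2 : f = "pit_not_safe"; · subst h2; decide
  by_cases h3 : f = "prices_not_adjusted"; · subst h3; decide
  by_cases h4 : f = "cost_not_included"; · subst h4; decide
  by_cases h5 : f = "future_leakage_risk"; · subst h5; decide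
  by_cases h6 : f = "annual_return_below_target"; · subst h6; decide
  by_cases h7 : f = "max_drawdown_above_limit"; · subst h7; decide
  by_cases h8 : f = "out_of_sample_missing"; · subst h8; decide
  rw [pv_ruleOf_none f h1 h2 h3 h4 h5 h6 h7 h8, Bool.eq_iff_iff]
  simp [h6]

theorem pv_ruleOf_eq_two (f : String) :
    (PySem.Dict.get? pvRuleOf f == some 2) = (f == "max_drawdown_above_limit") := by
  by_cases h1 : f = "missing_quality_check"; · subst h1; decide
  by_cases h2 : f = "pit_not_safe"; · subst h2; decide
  by_cases h3 : f = "prices_not_adjusted"; · subst h3; decide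
  by_cases h4 : f = "cost_not_included"; · subst h4; decide
  by_cases h5 : f = "future_leakage_risk"; · subst h5; decide
  by_cases h6 : f = "annual_return_below_target"; · subst h6; decide
  by_cases h7 : f = "max_drawdown_above_limit"; · subst h7; decide
  by_cases h8 : f = "out_of_sample_missing"; · subst h8; decide
  rw [pv_ruleOf_none f h1 h2 h3 h4 h5 h6 h7 h8, Bool.eq_iff_iff]
  simp [h7]

theorem pv_ruleOf_eq_three (f : String) :
    (PySem.Dict.get? pvRuleOf f == some 3) = (f == "out_of_sample_missing") := by
  by_cases h1 : f = "missing_quality_check"; · subst h1; decide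
  by_cases h2 : f = "pit_not_safe"; · subst h2; decide
  by_cases h3 : f = "prices_not_adjusted"; · subst h3; decide
  by_cases h4 : f = "cost_not_included"; · subst h4; decide
  by_cases h5 : f = "future_leakage_risk"; · subst h5; decide
  by_cases h6 : f = "annual_return_below_target"; · subst h6; decide
  by_cases h7 : f = "max_drawdown_above_limit"; · subst h7; decide
  by_cases h8 : f = "out_of_sample_missing"; · subst h8; decide
  rw [pv_ruleOf_none f h1 h2 h3 h4 h5 h6 h7 h8, Bool.eq_iff_iff]
  simp [h8]

-- one step of B's flag-setting loop, componentwise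
theorem pv_step_getD (t : List Bool) (ht : t.length = 4) (f : String) (j : Nat) (hj : j < 4) :
    (match PySem.Dict.get? pvRuleOf f with
     | some i => PySem.List.pySetD t i true
     | none => t).getD j false
    = (t.getD j false || (PySem.Dict.get? pvRuleOf f == some (j : Int))) := by
  rcases hg : PySem.Dict.get? pvRuleOf f with _ | i
  · simp
  · obtain ⟨hi0, _⟩ := pv_ruleOf_range f i hg
    simp only
    rw [PySem.List.pySetD_of_nonneg t true hi0]
    have hj4 : j < t.length := by omega
    rw [List.getD_eq_getElem _ _ (by simpa using hj4), List.getD_eq_getElem _ _ hj4,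
      List.getElem_set]
    by_cases hij : i.toNat = j
    · have : i = (j : Int) := by omega
      simp [hij, this]
    · have : i ≠ (j : Int) := by omega
      simp [hij, this]

-- the step preserves the flag array's length
theorem pv_step_len (t : List Bool) (f : String) :
    (match PySem.Dict.get? pvRuleOf f with
     | some i => PySem.List.pySetD t i true
     | none => t).length = t.length := by
  rcases hg : PySem.Dict.get? pvRuleOf f with _ | i <;> simp [PySem.List.length_pySetD]

-- B's whole fold, componentwise
theorem pv_fold_getD (fs : List String) (t : List Bool) (ht : t.length = 4) (j : Nat) (hj : j < 4) :
    (fs.foldl (fun t failure =>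
       match PySem.Dict.get? pvRuleOf failure with
       | some i => PySem.List.pySetD t i true
       | none => t) t).getD j false
    = (t.getD j false || fs.any (fun f => PySem.Dict.get? pvRuleOf f == some (j : Int))) := by
  induction fs generalizing t with
  | nil => simp
  | cons a as ih =>
      simp only [List.foldl_cons, List.any_cons]
      rw [ih _ (by rw [pv_step_len]; exact ht), pv_step_getD t ht a j hj, Bool.or_assoc]

theorem pv_fold_pyGetD (fs : List String) (j : Nat) (hj : j < 4) :
    PySem.List.pyGetD
      (fs.foldl (fun t failure =>
         match PySem.Dict.get? pvRuleOf failure with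
         | some i => PySem.List.pySetD t i true
         | none => t) [false, false, false, false]) (j : Int) false
    = fs.any (fun f => PySem.Dict.get? pvRuleOf f == some (j : Int)) := by
  rw [PySem.List.pyGetD_natCast, pv_fold_getD fs _ rfl j hj]
  interval_cases j <;> simp_all

theorem pv_any_ofList (xs : List String) (p : String → Bool) :
    (PySem.Set.ofList xs).any p = xs.any p := by
  rw [Bool.eq_iff_iff]
  simp [List.any_eq_true, PySem.Set.mem_ofList]

theorem pv_contains_ofList (xs : List String) (a : String) :
    PySem.Set.contains (PySem.Set.ofList xs) a = xs.any (fun f => f == a) := by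
  rw [Bool.eq_iff_iff]
  simp [PySem.Set.mem_ofList, List.any_eq_true]

-- ===== VERDICT (by name: the statement is the Claim_ definition above) =====
theorem select_next_research_actions_spec : Claim_equal_select_next_research_actions := by
  intro failures _
  unfold Spec_select_next_research_actions select_next_research_actions select_next_research_actions_alt
  have hr : PySem.List.pyRange 0 4 1 = [(0 : Int), 1, 2, 3] := by decide
  have g0 := pv_fold_pyGetD failures 0 (by omega)
  have g1 := pv_fold_pyGetD failures 1 (by omega)
  have g2 := pv_fold_pyGetD failures 2 (by omega)
  have g3 := pv_fold_pyGetD failures 3 (by omega)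
  push_cast at g0 g1 g2 g3
  simp only [hr, List.filter_cons, List.filter_nil, g0, g1, g2, g3,
    pv_ruleOf_eq_zero, pv_ruleOf_eq_one, pv_ruleOf_eq_two, pv_ruleOf_eq_three,
    pv_any_ofList, pv_contains_ofList]
  cases h0 : failures.any (fun f => pvIsInvalidFailure f) <;>
  cases h1 : failures.any (fun f => f == "annual_return_below_target") <;>
  cases h2 : failures.any (fun f => f == "max_drawdown_above_limit") <;>
  cases h3 : failures.any (fun f => f == "out_of_sample_missing") <;>
  simp [h1, h2, h3, pvActions, PySem.List.pyGetD, PySem.List.pyGet?, PySem.List.pyIdx?]
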